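-- pv_equiv track=rewrite | github.com/JazminCR/ModYSim | parte1/utiles/mcm_mcd_raicesPrim_periodMax.py | tiene_periodo_maximo_genMixto
-- ===== SOURCE A (Python) =====
-- def mcd(a, b):
--     while b != 0:
--         a, b = b, a % b
--     return a
--
-- def factores_primos(n):
--     factores = set()
--     d = 2
--     while d * d <= n:
--         while n % d == 0:
--             factores.add(d)
--             n //= d
--         d += 1
--     if n > 1:
--         factores.add(n)
--     return factores
--
-- def tiene_periodo_maximo_genMixto(a, c, M):
--     # 1. Verifica que c y M sean coprimos
--     if mcd(c, M) != 1:
--         return False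
--
--     # 2. Verifica que (a - 1) sea divisible por todos los factores primos de M
--     factores = factores_primos(M)
--     for p in factores:
--         if (a - 1) % p != 0:
--             return False
--
--     # 3. Si M es divisible por 4, entonces (a - 1) debe ser múltiplo de 4
--     if M % 4 == 0 and (a - 1) % 4 != 0:
--         return False
--
--     return True
-- ===== SOURCE B (Python) =====
-- def mcd(a, b):
--     while b != 0:
--         a, b = b, a % b
--     return a
--
-- def tiene_periodo_maximo_genMixto(a, c, M):
--     # 1. c and M coprime (same gcd test as before)
--     if mcd(c, M) != 1:
--         return False
--
--     # 2. Every prime factor of M divides a-1: peel shared factors of M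
--     #    with |a-1| by repeated gcd instead of factorizing M.
--     b = abs(a - 1)
--     m = M
--     while m > 1:
--         g = mcd(m, b)
--         if g == 1:
--             return False
--         m //= g
--
--     # 3. If 4 | M then 4 | a-1
--     if M % 4 == 0 and (a - 1) % 4 != 0:
--         return False
--
--     return True
-- ===== Notes on version B (the rewrite author's own statement) =====
-- stated objective: faster
-- what changed: Condition 2's trial-division factorization of M (plus a loop over the prime factors) is replaced by a gcd-reduction loop that repeatedly divides M by gcd(M, |a-1|) until it reaches 1 or hits a gcd of 1, so no prime factors are ever computed.
import Mathlib
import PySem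

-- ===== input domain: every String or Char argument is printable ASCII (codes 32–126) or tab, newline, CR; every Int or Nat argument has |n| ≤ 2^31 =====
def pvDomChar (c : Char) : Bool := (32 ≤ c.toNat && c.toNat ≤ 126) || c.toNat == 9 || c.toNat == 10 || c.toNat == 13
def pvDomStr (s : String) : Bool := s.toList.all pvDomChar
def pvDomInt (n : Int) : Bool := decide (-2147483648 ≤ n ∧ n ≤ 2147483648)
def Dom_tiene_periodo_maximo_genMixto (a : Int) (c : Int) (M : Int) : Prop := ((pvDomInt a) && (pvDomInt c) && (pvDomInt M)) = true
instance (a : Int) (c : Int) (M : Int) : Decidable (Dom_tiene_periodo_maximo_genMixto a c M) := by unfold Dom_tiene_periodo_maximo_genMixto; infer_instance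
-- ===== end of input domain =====

-- B replaces A's trial-division factorization of M (condition 2) by a gcd-peeling
-- loop that repeatedly strips from M its common factor with |a-1|; objective: faster.

-- ===== PORT A =====
-- termination fact for the Euclid loop (cited by pyMcd's decreasing_by)
theorem pyMcd_dec (a b : Int) (hb : ¬ b = 0) :
    (PySem.Int.mod a b).natAbs < b.natAbs := by
  rcases lt_trichotomy b 0 with h | h | h
  · have h1 := (PySem.Int.mod_neg_bounds a h).1
    have h2 := (PySem.Int.mod_neg_bounds a h).2
    omega
  · exact absurd h hb
  · have h1 := PySem.Int.mod_nonneg a h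
    have h2 := PySem.Int.mod_lt a h
    omega

-- mcd(a, b): Euclid's algorithm with Python's floor-sign '%'
def pyMcd (a b : Int) : Int :=
  if hb : b = 0 then a else pyMcd b (PySem.Int.mod a b)
termination_by b.natAbs
decreasing_by exact pyMcd_dec a b hb

-- inner 'while n % d == 0' loop of factores_primos; the '2 ≤ d ∧ 0 < n' guard only
-- makes the recursion total (it holds at every reachable call)
-- termination fact for the inner division loop (cited by fpInner's decreasing_by)
theorem fpInner_dec (d n : Int) (h : 2 ≤ d ∧ 0 < n ∧ PySem.Int.mod n d = 0) :
    (PySem.Int.floordiv n d).toNat < n.toNat := by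
  have hd0 : (0:Int) < d := by omega
  have hlt : PySem.Int.floordiv n d < n := by
    rw [PySem.Int.floordiv_lt_iff_lt_mul hd0]
    nlinarith [h.2.1, h.1]
  omega

def fpInner (d n : Int) (S : PySem.Set Int) : Int × PySem.Set Int :=
  if h : 2 ≤ d ∧ 0 < n ∧ PySem.Int.mod n d = 0 then
    fpInner d (PySem.Int.floordiv n d) (S.add d)
  else (n, S)
termination_by n.toNat
decreasing_by exact fpInner_dec d n h

-- result of fpInner never exceeds its input (used only for outer termination)
theorem fpInner_le (d n : Int) (S : PySem.Set Int) : (fpInner d n S).1 ≤ n := by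
  fun_induction fpInner d n S
  case case1 n S h ih =>
    have hd0 : (0:Int) < d := by omega
    have hlt : PySem.Int.floordiv n d < n := by
      rw [PySem.Int.floordiv_lt_iff_lt_mul hd0]
      nlinarith [h.2.1, h.1]
    omega
  case case2 => simp

-- termination fact for the outer trial-division loop (cited by fpOuter's decreasing_by)
theorem fpOuter_dec (d n : Int) (S : PySem.Set Int) (h : d * d ≤ n ∧ 2 ≤ d) :
    ((fpInner d n S).1 + 1 - (d + 1)).toNat < (n + 1 - d).toNat := by
  have h1 := fpInner_le d n S
  have h2 : d ≤ n := by nlinarith [h.1, h.2]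
  omega

-- outer 'while d * d <= n' loop of factores_primos ('2 ≤ d' again only for totality)
def fpOuter (d n : Int) (S : PySem.Set Int) : Int × PySem.Set Int :=
  if h : d * d ≤ n ∧ 2 ≤ d then
    fpOuter (d + 1) (fpInner d n S).1 (fpInner d n S).2
  else (n, S)
termination_by (n + 1 - d).toNat
decreasing_by exact fpOuter_dec d n S h

def factores_primos (n : Int) : PySem.Set Int :=
  let r := fpOuter 2 n PySem.Set.empty
  if 1 < r.1 then r.2.add r.1 else r.2

def tiene_periodo_maximo_genMixto (a : Int) (c : Int) (M : Int) : Bool :=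
  if pyMcd c M ≠ 1 then false
  else
    let factores := factores_primos M
    -- for p in factores: if (a-1) % p != 0: return False  (early-return-False loop = any)
    if factores.any (fun p => PySem.Int.mod (a - 1) p ≠ 0) then false
    else if PySem.Int.mod M 4 = 0 ∧ PySem.Int.mod (a - 1) 4 ≠ 0 then false
    else true

-- ===== PORT B =====
-- pyMcd never returns 0 unless both arguments are 0 (needed for peel's termination)
theorem pyMcd_natAbs (a b : Int) : (pyMcd a b).natAbs = Nat.gcd a.natAbs b.natAbs := by
  fun_induction pyMcd a b
  case case1 a => simp
  case case2 a b hb ih =>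
    rw [ih]
    show Int.gcd b (PySem.Int.mod a b) = Int.gcd a b
    rw [Int.gcd_comm]
    have hm : PySem.Int.mod a b = a + (-(PySem.Int.floordiv a b)) * b := by
      have h := PySem.Int.floordiv_mul_add_mod a b
      linarith
    rw [hm]
    exact Int.gcd_add_mul_right_left b a (-(PySem.Int.floordiv a b))

-- termination fact for the peeling loop (cited by peel's decreasing_by)
theorem peel_dec (m b : Int) (hm : 1 < m) (hg : ¬ pyMcd m b = 1) :
    (PySem.Int.floordiv m (pyMcd m b)).toNat < m.toNat := by
  have hg0 : (pyMcd m b).natAbs = Nat.gcd m.natAbs b.natAbs := pyMcd_natAbs m b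
  have hm0 : m.natAbs ≠ 0 := by omega
  have hne : pyMcd m b ≠ 0 := by
    intro h0
    rw [h0] at hg0
    exact hm0 (Nat.eq_zero_of_gcd_eq_zero_left hg0.symm)
  rcases lt_trichotomy (pyMcd m b) 0 with h | h | h
  · -- negative g: floordiv m g ≤ 0 since m > 0
    have h1 := (PySem.Int.mod_neg_bounds m h).1
    have h2 := (PySem.Int.mod_neg_bounds m h).2
    have h3 := PySem.Int.floordiv_mul_add_mod m (pyMcd m b)
    have : PySem.Int.floordiv m (pyMcd m b) < 1 := by nlinarith
    omega
  · exact absurd h hne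
  · have hg2 : 2 ≤ pyMcd m b := by omega
    have hlt : PySem.Int.floordiv m (pyMcd m b) < m := by
      rw [PySem.Int.floordiv_lt_iff_lt_mul h]
      nlinarith
    have hge : (0:Int) ≤ PySem.Int.floordiv m (pyMcd m b) := by
      rw [PySem.Int.le_floordiv_iff_mul_le h]
      omega
    omega

-- the 'while m > 1' gcd-peeling loop of B's condition 2
def peel (m b : Int) : Bool :=
  if hm : 1 < m then
    let g := pyMcd m b
    if hg : g = 1 then false
    else peel (PySem.Int.floordiv m g) b
  else true
termination_by m.toNat
decreasing_by exact peel_dec m b hm hg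

def tiene_periodo_maximo_genMixto_alt (a : Int) (c : Int) (M : Int) : Bool :=
  if pyMcd c M ≠ 1 then false
  else if ¬ peel M |a - 1| then false
  else if PySem.Int.mod M 4 = 0 ∧ PySem.Int.mod (a - 1) 4 ≠ 0 then false
  else true

-- ===== PRECONDITION & SPEC =====
def Spec_tiene_periodo_maximo_genMixto (a : Int) (c : Int) (M : Int) (out : Bool) : Prop := out = tiene_periodo_maximo_genMixto_alt a c M
instance (a : Int) (c : Int) (M : Int) (out : Bool) : Decidable (Spec_tiene_periodo_maximo_genMixto a c M out) := by unfold Spec_tiene_periodo_maximo_genMixto; infer_instance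

-- ===== CLAIM (what is proved, stated in full; the proofs are below) =====
def Claim_equal_tiene_periodo_maximo_genMixto : Prop := ∀ (a : Int) (c : Int) (M : Int), Dom_tiene_periodo_maximo_genMixto a c M → Spec_tiene_periodo_maximo_genMixto a c M (tiene_periodo_maximo_genMixto a c M)

-- ===== LEMMAS AND PROOFS =====

-- pyMcd is nonnegative on nonnegative arguments
theorem pyMcd_nonneg (a b : Int) (ha : 0 ≤ a) (hb : 0 ≤ b) : 0 ≤ pyMcd a b := by
  fun_induction pyMcd a b
  case case1 a => simpa using ha
  case case2 a b hbne ih =>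
    have hbpos : 0 < b := lt_of_le_of_ne hb (Ne.symm hbne)
    exact ih hb (PySem.Int.mod_nonneg a hbpos)

-- on nonnegative arguments pyMcd is the usual gcd
theorem pyMcd_eq_gcd (a b : Int) (ha : 0 ≤ a) (hb : 0 ≤ b) :
    pyMcd a b = (Int.gcd a b : Int) := by
  have h1 := pyMcd_natAbs a b
  have h2 := pyMcd_nonneg a b ha hb
  unfold Int.gcd
  omega

-- fpInner: keeps n positive, strips all factors d, adds d to the set iff d ∣ n
theorem fpInner_spec (d n : Int) (S : PySem.Set Int) (hd : 2 ≤ d) (hn : 0 < n) :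
    0 < (fpInner d n S).1 ∧ ¬ d ∣ (fpInner d n S).1 ∧
    (∃ k : ℕ, n = (fpInner d n S).1 * d ^ k) ∧
    (∀ x : Int, x ∈ (fpInner d n S).2 ↔ x ∈ S ∨ (d ∣ n ∧ x = d)) := by
  fun_induction fpInner d n S
  case case1 n S h ih =>
    have hdvd : d ∣ n := (PySem.Int.mod_eq_zero_iff_dvd n d).1 h.2.2
    have hd0 : (0:Int) < d := by omega
    obtain ⟨t, ht⟩ := hdvd
    have hfd : PySem.Int.floordiv n d = t := by
      rw [PySem.Int.floordiv_eq_ediv_of_pos hd0, ht, Int.mul_ediv_cancel_left t (by omega)]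
    have ht0 : 0 < t := by nlinarith
    obtain ⟨h1, h2, ⟨k, hk⟩, h4⟩ := ih (by rw [hfd]; exact ht0)
    refine ⟨h1, h2, ⟨k + 1, ?_⟩, ?_⟩
    · have hn2 : n = d * PySem.Int.floordiv n d := by rw [hfd]; exact ht
      conv_lhs => rw [hn2, hk]
      ring
    · intro x
      rw [h4 x, PySem.Set.mem_add]
      have hdn : d ∣ n := ⟨t, ht⟩
      constructor
      · rintro ((hx | rfl) | ⟨_, rfl⟩)
        · exact Or.inl hx
        · exact Or.inr ⟨hdn, rfl⟩
        · exact Or.inr ⟨hdn, rfl⟩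
      · rintro (hx | ⟨_, rfl⟩)
        · exact Or.inl (Or.inl hx)
        · exact Or.inl (Or.inr rfl)
  case case2 n S h =>
    refine ⟨hn, ?_, ⟨0, by ring⟩, ?_⟩
    · intro hdvd
      exact h ⟨hd, hn, (PySem.Int.mod_eq_zero_iff_dvd n d).2 hdvd⟩
    · intro x
      constructor
      · intro hx; exact Or.inl hx
      · rintro (hx | ⟨hdn, hxd⟩)
        · exact hx
        · exact absurd ⟨hd, hn, (PySem.Int.mod_eq_zero_iff_dvd n d).2 hdn⟩ h

-- fpOuter: if no prime below d divides n, the loop returns a positive divisor of n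
-- that is 1 or prime, and the set collects exactly the primes of n stripped away
theorem fpOuter_spec (d n : Int) (S : PySem.Set Int) (hd : 2 ≤ d) (hn : 0 < n)
    (hs : ∀ q : ℕ, q.Prime → (q:Int) < d → ¬ ((q:Int) ∣ n)) :
    0 < (fpOuter d n S).1 ∧ (fpOuter d n S).1 ∣ n ∧
    ((fpOuter d n S).1 = 1 ∨ Nat.Prime (fpOuter d n S).1.natAbs) ∧
    (∀ x : Int, x ∈ (fpOuter d n S).2 ↔ x ∈ S ∨
      ∃ q : ℕ, q.Prime ∧ (q:Int) ∣ n ∧ ¬ (q:Int) ∣ (fpOuter d n S).1 ∧ x = (q:Int)) := by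
  fun_induction fpOuter d n S
  case case1 d n S h ih =>
    obtain ⟨i1, i2, ⟨k, hk⟩, i4⟩ := fpInner_spec d n S h.2 hn
    have hdvd_n : (fpInner d n S).1 ∣ n := ⟨d ^ k, hk⟩
    have hs' : ∀ q : ℕ, q.Prime → (q:Int) < d + 1 → ¬ ((q:Int) ∣ (fpInner d n S).1) := by
      intro q hq hlt hqd
      by_cases hcase : (q:Int) < d
      · exact hs q hq hcase (hqd.trans hdvd_n)
      · have hqe : (q:Int) = d := by omega
        exact i2 (hqe ▸ hqd)
    obtain ⟨o1, o2, o3, o4⟩ := ih (by omega) i1 hs'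
    refine ⟨o1, o2.trans hdvd_n, o3, ?_⟩
    intro x
    rw [o4 x, i4 x]
    have ho2 := o2  -- (fpOuter …).1 ∣ (fpInner …).1
    constructor
    · rintro ((hx | ⟨hdn, hxd⟩) | ⟨q, hq, hqn, hqr, hxq⟩)
      · exact Or.inl hx
      · -- x = d, d ∣ n: d is prime (no smaller prime divides n)
        refine Or.inr ⟨d.natAbs, ?_, ?_, ?_, ?_⟩
        · have hne1 : d.natAbs ≠ 1 := by omega
          have hpf := Nat.minFac_prime hne1
          have hpdvd : (d.natAbs.minFac : Int) ∣ n := by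
            have h1 : (d.natAbs.minFac : Int) ∣ d := by
              rw [Int.natCast_dvd]
              exact Nat.minFac_dvd _
            exact h1.trans hdn
          have hge : ¬ ((d.natAbs.minFac : Int) < d) := fun hlt => hs _ hpf hlt hpdvd
          have hle : d.natAbs.minFac ≤ d.natAbs := Nat.minFac_le (by omega)
          have : d.natAbs.minFac = d.natAbs := by omega
          exact this ▸ hpf
        · rw [Int.natAbs_of_nonneg (by omega : (0:Int) ≤ d)]; exact hdn
        · rw [Int.natAbs_of_nonneg (by omega : (0:Int) ≤ d)]
          intro hdr
          exact i2 (hdr.trans ho2)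
        · rw [Int.natAbs_of_nonneg (by omega : (0:Int) ≤ d)]; exact hxd
      · exact Or.inr ⟨q, hq, hqn.trans hdvd_n, hqr, hxq⟩
    · rintro (hx | ⟨q, hq, hqn, hqr, hxq⟩)
      · exact Or.inl (Or.inl hx)
      · by_cases hcase : (q:Int) < d
        · exact absurd hqn (hs q hq hcase)
        · by_cases hqe : (q:Int) = d
          · exact Or.inl (Or.inr ⟨hqe ▸ hqn, hqe ▸ hxq⟩)
          · -- q > d: q divides the stripped n
            have hqint : Prime (q:Int) := Nat.prime_iff_prime_int.mp hq
            have hq' : (q:Int) ∣ (fpInner d n S).1 := by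
              rw [hk] at hqn
              rcases hqint.dvd_mul.mp hqn with h1 | h1
              · exact h1
              · exfalso
                have hqd : (q:Int) ∣ d := hqint.dvd_of_dvd_pow h1
                have := Int.le_of_dvd (by omega) hqd
                omega
            exact Or.inr ⟨q, hq, hq', hqr, hxq⟩
  case case2 d n S h =>
    refine ⟨hn, dvd_refl n, ?_, ?_⟩
    · by_cases h1 : n = 1
      · exact Or.inl h1
      · right
        by_contra hnp
        have hn2 : 2 ≤ n.natAbs := by omega
        have hsq := Nat.minFac_sq_le_self (by omega : 0 < n.natAbs) hnp
        have hpf := Nat.minFac_prime (by omega : n.natAbs ≠ 1)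
        have hdv : (n.natAbs.minFac : Int) ∣ n := by
          rw [Int.natCast_dvd]; exact Nat.minFac_dvd _
        have hlt : (n.natAbs.minFac : Int) < d := by
          have hnd : n < d * d := by
            rcases not_and_or.mp h with h' | h'
            · omega
            · omega
          have hsq' : (n.natAbs.minFac : Int) * n.natAbs.minFac ≤ n := by
            have := hsq
            rw [pow_two] at this
            have : ((n.natAbs.minFac * n.natAbs.minFac : ℕ) : Int) ≤ (n.natAbs : Int) := by
              exact_mod_cast this
            push_cast at this
            omega
          nlinarith
        exact hs _ hpf hlt hdv
    · intro x
      constructor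
      · intro hx; exact Or.inl hx
      · rintro (hx | ⟨q, hq, hqn, hqr, hxq⟩)
        · exact hx
        · exact absurd hqn hqr

-- the prime factor set computed by A, for M ≥ 2
theorem factores_mem (M : Int) (hM : 2 ≤ M) (x : Int) :
    x ∈ factores_primos M ↔ ∃ q : ℕ, q.Prime ∧ (q:Int) ∣ M ∧ x = (q:Int) := by
  obtain ⟨o1, o2, o3, o4⟩ := fpOuter_spec 2 M PySem.Set.empty (le_refl 2) (by omega)
    (by intro q hq hlt _; have := hq.two_le; omega)
  show x ∈ (if 1 < (fpOuter 2 M PySem.Set.empty).1 then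
      (fpOuter 2 M PySem.Set.empty).2.add (fpOuter 2 M PySem.Set.empty).1
    else (fpOuter 2 M PySem.Set.empty).2) ↔ _
  have hempty : ∀ y : Int, y ∈ (PySem.Set.empty : PySem.Set Int) ↔ False := by
    intro y; simp [PySem.Set.empty]
  split_ifs with hr
  · rw [PySem.Set.mem_add, o4 x, hempty x]
    constructor
    · rintro ((h | ⟨q, hq, hqM, _, hxq⟩) | hxr)
      · exact absurd h id
      · exact ⟨q, hq, hqM, hxq⟩
      · -- x is the leftover cofactor, which is prime here
        rcases o3 with h1 | hp
        · omega
        · refine ⟨(fpOuter 2 M PySem.Set.empty).1.natAbs, hp, ?_, ?_⟩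
          · rw [Int.natAbs_of_nonneg (by omega)]; exact o2
          · rw [Int.natAbs_of_nonneg (by omega)]; exact hxr
    · rintro ⟨q, hq, hqM, hxq⟩
      by_cases hdr : (q:Int) ∣ (fpOuter 2 M PySem.Set.empty).1
      · right
        rcases o3 with h1 | hp
        · exfalso; rw [h1] at hdr
          have := Int.le_of_dvd (by omega) hdr
          have := hq.two_le; omega
        · have hq' : q ∣ (fpOuter 2 M PySem.Set.empty).1.natAbs := Int.natCast_dvd.mp hdr
          have : q = (fpOuter 2 M PySem.Set.empty).1.natAbs :=
            (Nat.prime_dvd_prime_iff_eq hq hp).mp hq'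
          rw [hxq, this, Int.natAbs_of_nonneg (by omega)]
      · exact Or.inl (Or.inr ⟨q, hq, hqM, hdr, hxq⟩)
  · rw [o4 x, hempty x]
    have hr1 : (fpOuter 2 M PySem.Set.empty).1 = 1 := by omega
    constructor
    · rintro (h | ⟨q, hq, hqM, _, hxq⟩)
      · exact absurd h id
      · exact ⟨q, hq, hqM, hxq⟩
    · rintro ⟨q, hq, hqM, hxq⟩
      refine Or.inr ⟨q, hq, hqM, ?_, hxq⟩
      rw [hr1]
      intro hd1
      have := Int.le_of_dvd (by omega) hd1
      have := hq.two_le; omega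

-- for M ≤ 1 the factor set is empty
theorem factores_primos_le_one (M : Int) (hM : M ≤ 1) :
    factores_primos M = PySem.Set.empty := by
  unfold factores_primos fpOuter
  rw [dif_neg (by omega)]
  simp only []
  rw [if_neg (by omega)]

-- B's peeling loop tests exactly "every prime factor of m divides b"
theorem peel_iff (m b : Int) (hb : 0 ≤ b) (hm : 0 < m) :
    peel m b = true ↔ ∀ q : ℕ, q.Prime → (q:Int) ∣ m → (q:Int) ∣ b := by
  fun_induction peel m b
  case case1 m hm1 g hg1 =>
    simp only [Bool.false_eq_true, false_iff]
    intro hall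
    have hne1 : m.natAbs ≠ 1 := by omega
    have hpf := Nat.minFac_prime hne1
    have hdm : ((m.natAbs.minFac : ℕ) : Int) ∣ m := by
      rw [Int.natCast_dvd]; exact Nat.minFac_dvd _
    have hdb : ((m.natAbs.minFac : ℕ) : Int) ∣ b := hall _ hpf hdm
    have h1 : m.natAbs.minFac ∣ Nat.gcd m.natAbs b.natAbs :=
      Nat.dvd_gcd (Nat.minFac_dvd _) (Int.natCast_dvd.mp hdb)
    have h2 : (pyMcd m b).natAbs = Nat.gcd m.natAbs b.natAbs := pyMcd_natAbs m b
    have hg1' : pyMcd m b = 1 := hg1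
    rw [hg1'] at h2
    have := Nat.le_of_dvd (by omega) h1
    have := hpf.two_le
    omega
  case case2 m hm1 g hg1 ih =>
    have hgval : pyMcd m b = (Int.gcd m b : Int) := pyMcd_eq_gcd m b (by omega) hb
    have hg1' : pyMcd m b ≠ 1 := hg1
    have hgcd0 : Int.gcd m b ≠ 0 := by
      intro h0
      have := Int.eq_zero_of_gcd_eq_zero_left h0
      omega
    have hg2 : 2 ≤ pyMcd m b := by
      rw [hgval] at hg1' ⊢
      omega
    have hgm : pyMcd m b ∣ m := by rw [hgval]; exact Int.gcd_dvd_left m b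
    have hgb : pyMcd m b ∣ b := by rw [hgval]; exact Int.gcd_dvd_right m b
    obtain ⟨t, ht⟩ := hgm
    have hfd : PySem.Int.floordiv m (pyMcd m b) = t := by
      have hc : pyMcd m b * t / pyMcd m b = t :=
        Int.mul_ediv_cancel_left t (by omega)
      rw [← ht] at hc
      rw [PySem.Int.floordiv_eq_ediv_of_pos (by omega)]
      exact hc
    have ht0 : 0 < t := by nlinarith
    have hiha := ih (by
      show 0 < PySem.Int.floordiv m (pyMcd m b)
      rw [hfd]; exact ht0)
    show peel (PySem.Int.floordiv m (pyMcd m b)) b = true ↔ _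
    rw [hiha]
    constructor
    · intro hall q hq hqm
      have hqint : Prime (q:Int) := Nat.prime_iff_prime_int.mp hq
      rw [ht] at hqm
      rcases hqint.dvd_mul.mp hqm with h1 | h1
      · exact (dvd_trans h1 hgb)
      · exact hall q hq (hfd ▸ h1)
    · intro hall q hq hqm
      rw [hfd] at hqm
      refine hall q hq (hqm.trans ⟨pyMcd m b, ?_⟩)
      conv_lhs => rw [ht]
      ring
  case case3 m hm1 =>
    simp only [true_iff]
    intro q hq hqm
    have hm1 : m = 1 := by omega
    rw [hm1] at hqm
    have := Int.le_of_dvd (by omega) hqm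
    have := hq.two_le
    omega

-- dividing the absolute value means dividing the number
theorem dvd_abs_imp {p x : Int} (h : p ∣ |x|) : p ∣ x := (dvd_abs p x).mp h

-- A's condition-2 loop over the factor set answers exactly as B's peeling loop
theorem cond2_bridge (a M : Int) :
    ((factores_primos M).any (fun p => decide (PySem.Int.mod (a - 1) p ≠ 0)))
      = !(peel M |a - 1|) := by
  by_cases hM : M ≤ 1
  · rw [factores_primos_le_one M hM]
    have hp : peel M |a - 1| = true := by
      rw [peel, dif_neg (by omega)]
    rw [hp]
    simp [PySem.Set.empty]
  · push_neg at hM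
    have hpi := peel_iff M |a - 1| (abs_nonneg _) (by omega)
    cases hpeel : peel M |a - 1| with
    | true =>
      simp only [Bool.not_true]
      rw [List.any_eq_false]
      intro x hx
      obtain ⟨q, hq, hqM, rfl⟩ := (factores_mem M (by omega) x).mp hx
      have hdab : (q:Int) ∣ |a - 1| := (hpi.mp hpeel) q hq hqM
      have hda : (q:Int) ∣ (a - 1) := dvd_abs_imp hdab
      simp only [decide_eq_true_eq, Decidable.not_not]
      exact (PySem.Int.mod_eq_zero_iff_dvd _ _).2 hda
    | false =>
      simp only [Bool.not_false]
      rw [List.any_eq_true]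
      have hnall : ¬ ∀ q : ℕ, q.Prime → (q:Int) ∣ M → (q:Int) ∣ |a - 1| := by
        intro hall
        rw [← hpi] at hall
        rw [hall] at hpeel
        exact absurd hpeel (by simp)
      push_neg at hnall
      obtain ⟨q, hq, hqM, hnd⟩ := hnall
      refine ⟨(q:Int), (factores_mem M (by omega) _).mpr ⟨q, hq, hqM, rfl⟩, ?_⟩
      simp only [decide_eq_true_eq]
      intro hmod
      exact hnd ((dvd_abs _ _).mpr ((PySem.Int.mod_eq_zero_iff_dvd _ _).mp hmod))

-- ===== VERDICT (by name: the statement is the Claim_ definition above) =====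
theorem tiene_periodo_maximo_genMixto_spec : Claim_equal_tiene_periodo_maximo_genMixto := by
  intro a c M _
  unfold Spec_tiene_periodo_maximo_genMixto
  unfold tiene_periodo_maximo_genMixto tiene_periodo_maximo_genMixto_alt
  simp only []
  rw [cond2_bridge a M]
  by_cases h1 : pyMcd c M = 1
  · cases hpeel : peel M |a - 1| <;> simp [h1, hpeel]
  · simp [h1]
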